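-- pv_equiv track=rewrite | github.com/m-and-ms/Competitve-Programming-and-algorithms- | rec_max_path.py | max_path_dfs
-- ===== SOURCE A (Python) =====
-- def max_path_dfs(src,visted,tree,max_path,path):
--     path+=src
--     visted[src]=True
--
--     if(not tree[src]):
--         return path
--
--
--     for childs in tree[src]:
--
--         if(not visted[childs]):
--             p=max_path_dfs(childs,visted,tree,max_path,path)
--
--             max_path=max(max_path,p)
--
--     return max_path
-- ===== SOURCE B (Python) =====
-- def max_path_dfs(src, visted, tree, max_path, path):
--     # Iterative DFS with an explicit stack instead of recursion; marks `visted`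
--     # in place exactly like the recursive version (check at pop time, children
--     # pushed in reverse so the left-to-right depth-first order is identical).
--     visted[src] = True
--     cur = path + src
--     if not tree[src]:
--         return cur
--     result = max_path
--     stack = [(c, cur) for c in reversed(tree[src])]
--     while stack:
--         node, prefix = stack.pop()
--         if visted[node]:
--             continue
--         visted[node] = True
--         newpath = prefix + node
--         kids = tree[node]
--         if not kids:
--             if result < newpath:
--                 result = newpath
--         else:
--             for c in reversed(kids):
--                 stack.append((c, newpath))
--     return result
-- ===== Notes on version B (the rewrite author's own statement) =====
-- stated objective: alternative
-- what changed: The recursive DFS is replaced by an iterative DFS over an explicit stack (children pushed in reverse, visited checked and marked at pop time) that folds the running maximum in a single loop variable instead of threading it through recursive calls and per-frame max().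
import Mathlib
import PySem

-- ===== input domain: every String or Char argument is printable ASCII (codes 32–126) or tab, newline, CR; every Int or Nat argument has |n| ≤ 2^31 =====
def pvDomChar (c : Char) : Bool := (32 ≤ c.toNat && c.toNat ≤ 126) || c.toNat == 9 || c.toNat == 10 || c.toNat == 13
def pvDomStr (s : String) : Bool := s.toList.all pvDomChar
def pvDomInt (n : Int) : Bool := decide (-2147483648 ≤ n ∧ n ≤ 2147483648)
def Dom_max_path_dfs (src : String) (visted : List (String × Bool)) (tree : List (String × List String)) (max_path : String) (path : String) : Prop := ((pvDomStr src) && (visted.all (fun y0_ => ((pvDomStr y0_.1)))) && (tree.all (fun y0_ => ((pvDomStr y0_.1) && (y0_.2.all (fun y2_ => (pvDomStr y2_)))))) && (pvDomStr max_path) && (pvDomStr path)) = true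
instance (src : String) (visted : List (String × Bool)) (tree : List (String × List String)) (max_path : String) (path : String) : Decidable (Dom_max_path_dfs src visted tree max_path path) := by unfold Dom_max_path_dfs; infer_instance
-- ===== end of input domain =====

-- B replaces A's recursive DFS by an iterative DFS over an explicit stack (same
-- left-to-right depth-first order, visited checked at pop time). Both Pythons
-- mutate `visted` in place identically; the equivalence proved here is about the
-- return value.

-- Python's max(a, b) on strings (returns the first argument on ties).
def pymax (a b : String) : String := if a < b then b else a

-- ===== PORT A =====
-- Fuel-indexed transliteration of A's recursion (`none` = fuel ran out; the
-- top-level fuel `visted.length + 2` is proved sufficient below, since each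
-- recursive call is guarded by `not visted[child]` and flips that entry to True).
-- `visted[childs]` / `tree[src]` are ported as getD with the default that makes
-- the guard skip; exact on Pre_ (every consulted key is present there).
mutual
def goA (tree : PySem.Dict String (List String)) : Nat → String → PySem.Dict String Bool → String → String → Option (String × PySem.Dict String Bool)
  | 0, _, _, _, _ => none
  | f+1, src, v, mp, path =>
    let path' := path ++ src                    -- path += src
    let v1 := v.insert src true                 -- visted[src] = True
    let cs := tree.getD src []                  -- tree[src]
    if cs = [] then some (path', v1)            -- if not tree[src]: return path
    else loopA tree f cs v1 mp path'            -- for childs in tree[src]: …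
  termination_by f => (f, 0)
def loopA (tree : PySem.Dict String (List String)) : Nat → List String → PySem.Dict String Bool → String → String → Option (String × PySem.Dict String Bool)
  | _, [], v, mp, _ => some (mp, v)             -- return max_path
  | f, c :: cs, v, mp, path' =>
    if v.getD c true then loopA tree f cs v mp path'    -- if not visted[childs] fails: skip
    else
      match goA tree f c v mp path' with        -- p = max_path_dfs(childs, …)
      | none => none
      | some (p, v') => loopA tree f cs v' (pymax mp p) path'   -- max_path = max(max_path, p)
  termination_by f cs => (f, cs.length + 1)
end

def max_path_dfs (src : String) (visted : List (String × Bool)) (tree : List (String × List String)) (max_path : String) (path : String) : String :=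
  match goA (PySem.Dict.mk tree) (visted.length + 2) src (PySem.Dict.mk visted) max_path path with
  | some (p, _) => p
  | none => max_path                            -- unreachable: fuel is sufficient (goA_suff below)

-- ===== PORT B =====
-- Transliteration of Source B's while-loop. The Python stack (top = end of list,
-- children pushed in reversed order) is modelled head-first: popping the last
-- pushed element = taking the head, so pushing reversed children = prepending
-- them in order. One fuel unit per iteration; the fuel passed below is proved
-- sufficient. Lookups are getD as in port A (exact on Pre_).
def loopB (tree : PySem.Dict String (List String)) : Nat → List (String × String) → PySem.Dict String Bool → String → Option String
  | _, [], _, res => some res                   -- while stack: … exits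
  | 0, _ :: _, _, _ => none
  | f+1, (node, pre) :: rest, v, res =>
    if v.getD node true then loopB tree f rest v res        -- if visted[node]: continue
    else
      let v' := v.insert node true              -- visted[node] = True
      let np := pre ++ node                  -- newpath = prefix + node
      let cs := tree.getD node []               -- kids = tree[node]
      if cs = [] then loopB tree f rest v' (if res < np then np else res)   -- if result < newpath: result = newpath
      else loopB tree f (cs.map (fun c => (c, np)) ++ rest) v' res  -- push reversed kids

def max_path_dfs_alt (src : String) (visted : List (String × Bool)) (tree : List (String × List String)) (max_path : String) (path : String) : String :=
  let td := PySem.Dict.mk tree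
  let v1 := (PySem.Dict.mk visted).insert src true          -- visted[src] = True
  let cur := path ++ src                                    -- cur = path + src
  let cs := td.getD src []
  if cs = [] then cur                                       -- if not tree[src]: return cur
  else
    let C := (tree.map (fun p => p.2.length)).sum
    match loopB td (cs.length + (visted.length + 1) * (C + 1) + 1) (cs.map (fun c => (c, cur))) v1 max_path with
    | some r => r
    | none => max_path                          -- unreachable: fuel is sufficient (loopB_suff below)

-- ===== PRECONDITION & SPEC =====
-- Pre_ is the exact no-KeyError condition of Python A: A consults tree[n] for every
-- node n it processes and visted[c] for every child c of such an n; the processed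
-- nodes are src plus the initially-unvisited nodes reachable from src through
-- initially-unvisited nodes. `reachA` computes that closure of the input graph
-- (a reachability condition on the input, not a re-run of either program; a child
-- equal to src is always a visted key by then, since A assigns visted[src] first).
def reachA (tree : List (String × List String)) (visted : List (String × Bool)) (src : String) : List String :=
  (fun P => PySem.Set.update P ((P.flatMap (fun n => PySem.Dict.getD (PySem.Dict.mk tree) n [])).filter
      (fun c => PySem.Dict.get? (PySem.Dict.mk visted) c == some false)))^[visted.length + 1]
    (PySem.Set.ofList [src])

def Pre_max_path_dfs (src : String) (visted : List (String × Bool)) (tree : List (String × List String)) (max_path : String) (path : String) : Prop :=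
  ∀ n ∈ reachA tree visted src,
    n ∈ tree.map Prod.fst ∧
      ∀ c ∈ PySem.Dict.getD (PySem.Dict.mk tree) n [], c ∈ visted.map Prod.fst ∨ c = src
instance (src : String) (visted : List (String × Bool)) (tree : List (String × List String)) (max_path : String) (path : String) : Decidable (Pre_max_path_dfs src visted tree max_path path) := by unfold Pre_max_path_dfs; infer_instance

def pvWitness_max_path_dfs : String × (List (String × Bool)) × (List (String × List String)) × String × String :=
  ("a", [("a", false), ("b", false), ("c", false)], [("a", ["b", "c"]), ("b", []), ("c", [])], "", "")

def Spec_max_path_dfs (src : String) (visted : List (String × Bool)) (tree : List (String × List String)) (max_path : String) (path : String) (out : String) : Prop := out = max_path_dfs_alt src visted tree max_path path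
instance (src : String) (visted : List (String × Bool)) (tree : List (String × List String)) (max_path : String) (path : String) (out : String) : Decidable (Spec_max_path_dfs src visted tree max_path path out) := by unfold Spec_max_path_dfs; infer_instance

-- ===== CLAIM (what is proved, stated in full; the proofs are below) =====
def Claim_equal_max_path_dfs : Prop := ∀ (src : String) (visted : List (String × Bool)) (tree : List (String × List String)) (max_path : String) (path : String), Dom_max_path_dfs src visted tree max_path path → Pre_max_path_dfs src visted tree max_path path → Spec_max_path_dfs src visted tree max_path path (max_path_dfs src visted tree max_path path)

-- ===== LEMMAS AND PROOFS =====

theorem pymax_eq_max (a b : String) : pymax a b = max a b := by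
  unfold pymax
  split
  · next h => exact (max_eq_right h.le).symm
  · next h => exact (max_eq_left (not_lt.mp h)).symm

-- number of False entries of the dict: the termination measure of A's recursion
def fc (v : PySem.Dict String Bool) : Nat := v.items.countP (fun p => !p.2)

theorem countP_replace_le (l : List (String × Bool)) (k : String) :
    (l.map (fun p => if (p.1 == k) = true then (k, true) else p)).countP (fun p => !p.2)
      ≤ l.countP (fun p => !p.2) := by
  induction l with
  | nil => simp
  | cons a l ih =>
    simp only [List.map_cons, List.countP_cons]
    by_cases hk : (a.1 == k) = true
    · have h0 : (!((k, true) : String × Bool).2) = false := rfl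
      simp only [if_pos hk, h0, Bool.false_eq_true, if_false]
      omega
    · rw [if_neg hk]
      omega

theorem fc_insert_true_le (v : PySem.Dict String Bool) (k : String) :
    fc (v.insert k true) ≤ fc v := by
  unfold fc
  rw [PySem.Dict.items_insert]
  split
  · exact countP_replace_le v.items k
  · simp [List.countP_append]

theorem countP_replace_lt (k : String) :
    ∀ l : List (String × Bool), (PySem.Dict.mk l).get? k = some false →
      (l.map (fun p => if (p.1 == k) = true then (k, true) else p)).countP (fun p => !p.2)
        < l.countP (fun p => !p.2) := by
  intro l
  induction l with
  | nil =>
    intro h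
    rw [show (PySem.Dict.mk ([] : List (String × Bool))).get? k = none from rfl] at h
    cases h
  | cons a l ih =>
    intro h
    rw [PySem.Dict.get?_mk_cons] at h
    simp only [List.map_cons, List.countP_cons]
    by_cases hk : (a.1 == k) = true
    · rw [if_pos hk] at h ⊢
      have ha : a.2 = false := by simpa using h
      have h0 : (!((k, true) : String × Bool).2) = false := rfl
      have h1 : (!a.2) = true := by rw [ha]; rfl
      rw [h0, h1]
      have := countP_replace_le l k
      rw [show (if false = true then (1:Nat) else 0) = 0 from rfl,
        show (if true = true then (1:Nat) else 0) = 1 from rfl]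
      omega
    · rw [if_neg hk] at h ⊢
      have := ih h
      omega

theorem fc_insert_true_lt (v : PySem.Dict String Bool) (k : String)
    (h : v.getD k true = false) : fc (v.insert k true) < fc v := by
  have hget : v.get? k = some false := by
    rw [PySem.Dict.getD_eq_get?_getD] at h
    cases hg : v.get? k with
    | none => simp [hg] at h
    | some b => simp [hg] at h; rw [h]
  have hcont : v.contains k = true := by
    rw [PySem.Dict.contains_eq_isSome_get?, hget]; rfl
  unfold fc
  rw [PySem.Dict.items_insert, if_pos hcont]
  exact countP_replace_lt k v.items (by cases v; exact hget)

theorem goA_fc (tree : PySem.Dict String (List String)) :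
    ∀ f : Nat,
      (∀ src v mp path r, goA tree f src v mp path = some r → fc r.2 ≤ fc v) ∧
      (∀ cs v mp path r, loopA tree f cs v mp path = some r → fc r.2 ≤ fc v) := by
  intro f
  induction f with
  | zero =>
    refine ⟨fun src v mp path r h => by simp [goA] at h, ?_⟩
    intro cs
    induction cs with
    | nil =>
      intro v mp path r h
      simp only [loopA] at h
      cases h; simp
    | cons c cs ihc =>
      intro v mp path r h
      simp only [loopA] at h
      split at h
      · exact ihc v mp path r h
      · simp [goA] at h
  | succ f ih =>
    have hgo : ∀ src v mp path r, goA tree (f+1) src v mp path = some r → fc r.2 ≤ fc v := by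
      intro src v mp path r h
      simp only [goA] at h
      split at h
      · cases h; exact fc_insert_true_le v src
      · exact le_trans (ih.2 _ _ _ _ _ h) (fc_insert_true_le v src)
    refine ⟨hgo, ?_⟩
    intro cs
    induction cs with
    | nil =>
      intro v mp path r h
      simp only [loopA] at h
      cases h; simp
    | cons c cs ihc =>
      intro v mp path r h
      simp only [loopA] at h
      split at h
      · exact ihc v mp path r h
      · cases hg : goA tree (f+1) c v mp path with
        | none => rw [hg] at h; cases h
        | some pv =>
          obtain ⟨p, v''⟩ := pv
          rw [hg] at h
          exact le_trans (ihc _ _ _ _ h) (hgo _ _ _ _ _ hg)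

theorem goA_suff (tree : PySem.Dict String (List String)) :
    ∀ f : Nat,
      (∀ src v mp path, fc (v.insert src true) + 1 < f → (goA tree f src v mp path).isSome) ∧
      (∀ cs v mp path, fc v < f → (loopA tree f cs v mp path).isSome) := by
  intro f
  induction f with
  | zero => exact ⟨fun src v mp path h => absurd h (by omega), fun cs v mp path h => absurd h (by omega)⟩
  | succ f ih =>
    have hgo : ∀ src v mp path, fc (v.insert src true) + 1 < f + 1 → (goA tree (f+1) src v mp path).isSome := by
      intro src v mp path h
      simp only [goA]
      split
      · rfl
      · exact ih.2 _ _ _ _ (by omega)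
    refine ⟨hgo, ?_⟩
    intro cs
    induction cs with
    | nil => intro v mp path h; simp [loopA]
    | cons c cs ihc =>
      intro v mp path h
      simp only [loopA]
      split
      · exact ihc v mp path h
      · next hvis =>
        have hfalse : v.getD c true = false := by
          cases hb : v.getD c true
          · rfl
          · exact absurd hb hvis
        have hlt := fc_insert_true_lt v c hfalse
        have hs := hgo c v mp path (by omega)
        obtain ⟨⟨p, v'⟩, hp⟩ := Option.isSome_iff_exists.mp hs
        rw [hp]
        apply ihc
        have hle := (goA_fc tree (f+1)).1 _ _ _ _ _ hp
        simp only at hle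
        omega

theorem loopB_mono (tree : PySem.Dict String (List String)) :
    ∀ f stack v res r, loopB tree f stack v res = some r → loopB tree (f+1) stack v res = some r := by
  intro f
  induction f with
  | zero =>
    intro stack v res r h
    cases stack with
    | nil => exact h
    | cons a rest => simp [loopB] at h
  | succ f ih =>
    intro stack v res r h
    cases stack with
    | nil => exact h
    | cons a rest =>
      obtain ⟨node, pre⟩ := a
      simp only [loopB] at h ⊢
      by_cases h1 : v.getD node true = true
      · rw [if_pos h1] at h ⊢
        exact ih _ _ _ _ h
      · rw [if_neg h1] at h ⊢
        by_cases h2 : tree.getD node [] = []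
        · rw [if_pos h2] at h ⊢
          exact ih _ _ _ _ h
        · rw [if_neg h2] at h ⊢
          exact ih _ _ _ _ h

theorem loopB_mono_le (tree : PySem.Dict String (List String)) {f g : Nat} (h : f ≤ g)
    {stack v res r} (hf : loopB tree f stack v res = some r) : loopB tree g stack v res = some r := by
  induction g, h using Nat.le_induction with
  | base => exact hf
  | succ n _ ih => exact loopB_mono tree n _ _ _ _ ih

theorem loopB_suff (tree : PySem.Dict String (List String)) (C : Nat)
    (hC : ∀ node, (tree.getD node []).length ≤ C) :
    ∀ k : Nat, ∀ stack v res f, fc v ≤ k → stack.length + k * (C + 1) + 1 ≤ f →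
      (loopB tree f stack v res).isSome := by
  intro k
  induction k with
  | zero =>
    intro stack
    induction stack with
    | nil => intro v res f _ _; cases f <;> simp [loopB]
    | cons a rest ih =>
      intro v res f hk hf
      cases f with
      | zero => simp only [List.length_cons] at hf; omega
      | succ f =>
        obtain ⟨node, pre⟩ := a
        simp only [loopB]
        by_cases h1 : v.getD node true = true
        · rw [if_pos h1]
          exact ih v res f hk (by simp only [List.length_cons] at hf; omega)
        · have hfalse : v.getD node true = false := by
            cases hb : v.getD node true
            · rfl
            · exact absurd hb h1
          have := fc_insert_true_lt v node hfalse
          omega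
  | succ k ihk =>
    intro stack
    induction stack with
    | nil => intro v res f _ _; cases f <;> simp [loopB]
    | cons a rest ih =>
      intro v res f hk hf
      cases f with
      | zero => simp only [List.length_cons] at hf; omega
      | succ f =>
        obtain ⟨node, pre⟩ := a
        simp only [loopB]
        by_cases h1 : v.getD node true = true
        · rw [if_pos h1]
          exact ih v res f hk (by simp only [List.length_cons] at hf; omega)
        · rw [if_neg h1]
          have hfalse : v.getD node true = false := by
            cases hb : v.getD node true
            · rfl
            · exact absurd hb h1
          have hlt := fc_insert_true_lt v node hfalse
          have hmul : (k + 1) * (C + 1) = k * (C + 1) + (C + 1) := by ring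
          by_cases h2 : tree.getD node [] = []
          · rw [if_pos h2]
            exact ihk rest (v.insert node true) (pymax res (pre ++ node)) f (by omega)
              (by simp only [List.length_cons] at hf; omega)
          · rw [if_neg h2]
            have hcl := hC node
            apply ihk _ (v.insert node true) res f (by omega)
            simp only [List.length_append, List.length_map, List.length_cons] at hf ⊢
            omega

-- agreement of the two fuels at a common value
theorem loopB_det (tree : PySem.Dict String (List String)) {f g stack v res r r'}
    (hf : loopB tree f stack v res = some r) (hg : loopB tree g stack v res = some r') : r = r' := by
  have h1 := loopB_mono_le tree (Nat.le_max_left f g) hf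
  have h2 := loopB_mono_le tree (Nat.le_max_right f g) hg
  rw [h1] at h2; exact Option.some.inj h2

-- "B's loop can finish stack from state (v, res) with value out"
def LB (tree : PySem.Dict String (List String)) (stack : List (String × String)) (v : PySem.Dict String Bool) (res out : String) : Prop :=
  ∃ g, loopB tree g stack v res = some out

theorem loopA_ge (tree : PySem.Dict String (List String)) :
    ∀ f cs v mp path' mp' v', loopA tree f cs v mp path' = some (mp', v') → mp ≤ mp' := by
  intro f cs
  induction cs with
  | nil =>
    intro v mp path' mp' v' h
    simp only [loopA] at h
    cases h; exact le_refl _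
  | cons c cs ih =>
    intro v mp path' mp' v' h
    simp only [loopA] at h
    split at h
    · exact ih v mp path' mp' v' h
    · cases hg : goA tree f c v mp path' with
      | none => rw [hg] at h; cases h
      | some pv =>
        obtain ⟨p, v''⟩ := pv
        rw [hg] at h
        have := ih _ _ _ _ _ h
        calc mp ≤ max mp p := le_max_left _ _
          _ = pymax mp p := (pymax_eq_max _ _).symm
          _ ≤ mp' := this

-- the simulation invariants
def SIM (tree : PySem.Dict String (List String)) (f : Nat) : Prop :=
  ∀ node v mp path p v', goA tree f node v mp path = some (p, v') → v.getD node true = false →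
    ∀ rest out, LB tree rest v' (pymax mp p) out → LB tree ((node, path) :: rest) v mp out

def SIMLIST (tree : PySem.Dict String (List String)) (f : Nat) : Prop :=
  ∀ cs v mp path' mp' v', loopA tree f cs v mp path' = some (mp', v') →
    ∀ rest out, LB tree rest v' mp' out → LB tree (cs.map (fun c => (c, path')) ++ rest) v mp out

theorem simList (tree : PySem.Dict String (List String)) (f : Nat) (hsim : SIM tree f) : SIMLIST tree f := by
  intro cs
  induction cs with
  | nil =>
    intro v mp path' mp' v' h rest out hL
    simp only [loopA] at h
    cases h
    simpa using hL
  | cons c cs ih =>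
    intro v mp path' mp' v' h rest out hL
    simp only [loopA] at h
    by_cases h1 : v.getD c true = true
    · rw [if_pos h1] at h
      obtain ⟨g, hg⟩ := ih v mp path' mp' v' h rest out hL
      refine ⟨g + 1, ?_⟩
      simp only [List.map_cons, List.cons_append, loopB]
      rw [if_pos h1]
      exact hg
    · rw [if_neg h1] at h
      have hfalse : v.getD c true = false := by
        cases hb : v.getD c true
        · rfl
        · exact absurd hb h1
      cases hg : goA tree f c v mp path' with
      | none => rw [hg] at h; cases h
      | some pv =>
        obtain ⟨p, v''⟩ := pv
        rw [hg] at h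
        have hrec := ih v'' (pymax mp p) path' mp' v' h rest out hL
        have := hsim c v mp path' p v'' hg hfalse (cs.map (fun c => (c, path')) ++ rest) out hrec
        simpa using this


theorem simGo (tree : PySem.Dict String (List String)) (f : Nat) (hlist : SIMLIST tree f) : SIM tree (f + 1) := by
  intro node v mp path p v' h hvis rest out hL
  have hvis' : ¬ (v.getD node true = true) := by rw [hvis]; exact Bool.false_ne_true
  simp only [goA] at h
  by_cases hcs : tree.getD node [] = []
  · rw [if_pos hcs] at h
    have hpair := Option.some.inj h
    injection hpair with hp hv
    obtain ⟨g, hg⟩ := hL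
    refine ⟨g + 1, ?_⟩
    simp only [loopB]
    rw [if_neg hvis', if_pos hcs, hv, hp]
    exact hg
  · rw [if_neg hcs] at h
    have hge : mp ≤ p := loopA_ge tree f _ _ _ _ _ _ h
    have hpm : pymax mp p = p := by rw [pymax_eq_max]; exact max_eq_right hge
    rw [hpm] at hL
    obtain ⟨g, hg⟩ := hlist (tree.getD node []) (v.insert node true) mp (path ++ node) p v' h rest out hL
    refine ⟨g + 1, ?_⟩
    simp only [loopB]
    rw [if_neg hvis', if_neg hcs]
    exact hg

theorem simAll (tree : PySem.Dict String (List String)) : ∀ f, SIM tree f ∧ SIMLIST tree f := by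
  intro f
  induction f with
  | zero =>
    constructor
    · intro node v mp path p v' h
      simp [goA] at h
    · exact simList tree 0 (by intro node v mp path p v' h; simp [goA] at h)
  | succ n ih =>
    have hs : SIM tree (n + 1) := simGo tree n ih.2
    exact ⟨hs, simList tree (n + 1) hs⟩

theorem len_getD_mk_le (l : List (String × List String)) (k : String) :
    ((PySem.Dict.mk l).getD k []).length ≤ (l.map (fun p => p.2.length)).sum := by
  induction l with
  | nil => simp [PySem.Dict.getD_eq_get?_getD, show (PySem.Dict.mk ([] : List (String × List String))).get? k = none from rfl]
  | cons a l ih =>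
    rw [PySem.Dict.getD_eq_get?_getD, PySem.Dict.get?_mk_cons]
    rw [PySem.Dict.getD_eq_get?_getD] at ih
    simp only [List.map_cons, List.sum_cons]
    by_cases hk : (a.1 == k) = true
    · rw [if_pos hk]
      simp only [Option.getD_some]
      omega
    · rw [if_neg hk]
      omega

-- ===== VERDICT (by name: the statement is the Claim_ definition above) =====
theorem max_path_dfs_spec : Claim_equal_max_path_dfs := by
  intro src visted tree mp path _ _
  unfold Spec_max_path_dfs max_path_dfs
  simp only [max_path_dfs_alt]
  have hAs : (goA (PySem.Dict.mk tree) (visted.length + 2) src (PySem.Dict.mk visted) mp path).isSome := by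
    apply (goA_suff (PySem.Dict.mk tree) (visted.length + 2)).1
    have h1 : fc ((PySem.Dict.mk visted).insert src true) ≤ fc (PySem.Dict.mk visted) :=
      fc_insert_true_le _ _
    have h2 : fc (PySem.Dict.mk visted) ≤ visted.length := List.countP_le_length
    omega
  obtain ⟨⟨p, v'⟩, hA⟩ := Option.isSome_iff_exists.mp hAs
  rw [hA]
  have hA' := hA
  rw [show visted.length + 2 = (visted.length + 1) + 1 from rfl] at hA'
  simp only [goA] at hA'
  by_cases hcs : (PySem.Dict.mk tree).getD src [] = []
  · rw [if_pos hcs] at hA'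
    have hpair := Option.some.inj hA'
    injection hpair with hp _
    rw [if_pos hcs, ← hp]
  · rw [if_neg hcs] at hA'
    rw [if_neg hcs]
    obtain ⟨g, hg⟩ :=
      (simAll (PySem.Dict.mk tree) (visted.length + 1)).2 _ _ _ _ _ _ hA' [] p ⟨0, rfl⟩
    rw [List.append_nil] at hg
    have hBs : (loopB (PySem.Dict.mk tree)
        (((PySem.Dict.mk tree).getD src []).length +
          (visted.length + 1) * ((tree.map (fun p => p.2.length)).sum + 1) + 1)
        (((PySem.Dict.mk tree).getD src []).map (fun c => (c, path ++ src)))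
        ((PySem.Dict.mk visted).insert src true) mp).isSome := by
      apply loopB_suff (PySem.Dict.mk tree) _ (fun node => len_getD_mk_le tree node) (visted.length + 1)
      · have h1 : fc ((PySem.Dict.mk visted).insert src true) ≤ fc (PySem.Dict.mk visted) :=
          fc_insert_true_le _ _
        have h2 : fc (PySem.Dict.mk visted) ≤ visted.length := List.countP_le_length
        omega
      · simp [List.length_map]
    obtain ⟨r', hB⟩ := Option.isSome_iff_exists.mp hBs
    rw [hB]
    exact (loopB_det (PySem.Dict.mk tree) hB hg).symm ▸ rfl
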